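-- pv_equiv track=rewrite | github.com/jaypyon/ACM-ICPC | 예산.py | solution
-- ===== SOURCE A (Python) =====
-- def solution(d, budget):
--     answer = 0
--     d = sorted(d)
--     crit = 0
--     for i in d:
--         crit+=i
--         if crit > budget:
--             break;
--         answer+=1
--     return answer
-- ===== SOURCE B (Python) =====
-- def solution(d, budget):
--     rest = list(d)
--     remaining = budget
--     count = 0
--     while rest:
--         m = min(rest)
--         if m > remaining:
--             break
--         remaining -= m
--         rest.remove(m)
--         count += 1
--     return count
-- ===== Notes on version B (the rewrite author's own statement) =====
-- stated objective: alternative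
-- what changed: B never sorts: it is a selection-based loop that repeatedly extracts the minimum remaining element (min + remove) and deducts it from the remaining budget until the next minimum no longer fits, instead of A's sort-then-accumulate-with-break loop.
import Mathlib
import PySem

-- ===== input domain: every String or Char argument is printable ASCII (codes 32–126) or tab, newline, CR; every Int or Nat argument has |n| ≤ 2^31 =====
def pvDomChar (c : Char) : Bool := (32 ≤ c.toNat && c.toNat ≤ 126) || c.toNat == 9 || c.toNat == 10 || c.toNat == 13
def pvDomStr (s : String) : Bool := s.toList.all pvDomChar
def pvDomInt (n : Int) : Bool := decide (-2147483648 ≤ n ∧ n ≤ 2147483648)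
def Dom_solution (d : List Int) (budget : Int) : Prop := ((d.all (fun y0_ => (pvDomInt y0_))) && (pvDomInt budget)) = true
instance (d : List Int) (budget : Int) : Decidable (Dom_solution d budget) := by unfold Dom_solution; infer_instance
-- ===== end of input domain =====

-- B replaces A's sort-then-accumulate-with-break loop by a selection loop with no sort:
-- repeatedly extract the minimum remaining element and deduct it from the remaining budget
-- until the next minimum no longer fits; alternative algorithm, same return value everywhere.

-- ===== PORT A =====
-- the for-loop of A with its `answer`/`crit` state and the `break`
def solutionLoop (budget : Int) : List Int → Int → Int → Int
  | [], answer, _ => answer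
  | i :: rest, answer, crit =>
    let crit' := crit + i
    if crit' > budget then answer
    else solutionLoop budget rest (answer + 1) crit'

def solution (d : List Int) (budget : Int) : Int :=
  solutionLoop budget (PySem.List.sorted d (fun x => x) false) 0 0

-- ===== PORT B =====
-- B's `while rest:` loop: m = min(rest); stop if it exceeds the remaining budget,
-- else deduct it, rest.remove(m), count += 1.  (remove? = none is unreachable: min?
-- returns a member; the branch only makes the match total.)
def solAltLoop (rest : List Int) (remaining count : Int) : Int :=
  match hm : PySem.List.min? rest (fun x => x) with
  | none => count
  | some m =>
    if m > remaining then count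
    else
      match hr : PySem.List.remove? rest m with
      | none => count
      | some rest' => solAltLoop rest' (remaining - m) (count + 1)
termination_by rest.length
decreasing_by
  have hmem : m ∈ rest := PySem.List.min?_mem hm
  have h2 : rest' = rest.erase m :=
    Option.some.inj (hr.symm.trans (PySem.List.remove?_eq_some_erase rest m hmem))
  have hpos : 0 < rest.length := List.length_pos_of_mem hmem
  rw [h2, List.length_erase_of_mem hmem]
  omega

def solution_alt (d : List Int) (budget : Int) : Int :=
  solAltLoop d budget 0

-- ===== PRECONDITION & SPEC =====
def Spec_solution (d : List Int) (budget : Int) (out : Int) : Prop := out = solution_alt d budget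
instance (d : List Int) (budget : Int) (out : Int) : Decidable (Spec_solution d budget out) := by unfold Spec_solution; infer_instance

-- ===== CLAIM (what is proved, stated in full; the proofs are below) =====
def Claim_equal_solution : Prop := ∀ (d : List Int) (budget : Int), Dom_solution d budget → Spec_solution d budget (solution d budget)

-- ===== LEMMAS AND PROOFS =====

-- common characterisation: how many initial elements of a (sorted) list fit into budget b
def pvF : List Int → Int → Int
  | [], _ => 0
  | x :: rest, b => if x > b then 0 else 1 + pvF rest (b - x)

theorem solutionLoop_eq_pvF (budget : Int) (xs : List Int) :
    ∀ (a c : Int), solutionLoop budget xs a c = a + pvF xs (budget - c) := by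
  induction xs with
  | nil => intro a c; simp [solutionLoop, pvF]
  | cons x rest ih =>
    intro a c
    simp only [solutionLoop, pvF]
    by_cases h : c + x > budget
    · rw [if_pos h, if_pos (by omega)]; omega
    · rw [if_neg h, if_neg (by omega), ih]
      have : budget - (c + x) = budget - c - x := by omega
      rw [this]; ring

-- pulling the minimum to the front of sorted(l)
theorem sorted_cons_min (l : List Int) (m : Int)
    (hm : PySem.List.min? l (fun x => x) = some m) :
    PySem.List.sorted l (fun x => x) false =
      m :: PySem.List.sorted (l.erase m) (fun x => x) false := by
  have hmem : m ∈ l := PySem.List.min?_mem hm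
  have hmin : ∀ y ∈ l, m ≤ y := PySem.List.min?_isMin hm
  refine PySem.List.sorted_id_eq_of_perm_of_pairwise l
    (m :: PySem.List.sorted (l.erase m) (fun x => x) false) ?_ ?_
  · exact ((PySem.List.sorted_perm _ _ _).cons m).trans (List.perm_cons_erase hmem).symm
  · refine List.pairwise_cons.2 ⟨?_, ?_⟩
    · intro y hy
      exact hmin y (l.erase_subset ((PySem.List.mem_sorted _ _ _ _).1 hy))
    · exact PySem.List.sorted_pairwise _ _

theorem solAltLoop_eq_pvF (rest : List Int) :
    ∀ (r c : Int),
      solAltLoop rest r c = c + pvF (PySem.List.sorted rest (fun x => x) false) r := by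
  induction rest using (measure List.length).wf.induction with
  | _ rest ih =>
    intro r c
    rw [solAltLoop.eq_def]
    cases hm : PySem.List.min? rest (fun x => x) with
    | none =>
      have : rest = [] := (PySem.List.min?_eq_none_iff _ _).1 hm
      subst this
      simp [PySem.List.sorted, pvF]
    | some m =>
      have hmem : m ∈ rest := PySem.List.min?_mem hm
      rw [sorted_cons_min rest m hm]
      simp only [pvF]
      by_cases hgt : m > r
      · rw [if_pos hgt, if_pos hgt]; ring
      · rw [if_neg hgt, if_neg hgt]
        rw [PySem.List.remove?_eq_some_erase rest m hmem]
        have hlt : (rest.erase m).length < rest.length := by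
          have hpos : 0 < rest.length := List.length_pos_of_mem hmem
          rw [List.length_erase_of_mem hmem]; omega
        show solAltLoop (rest.erase m) (r - m) (c + 1) = _
        rw [ih (rest.erase m) hlt (r - m) (c + 1)]
        ring

-- ===== VERDICT (by name: the statement is the Claim_ definition above) =====
theorem solution_spec : Claim_equal_solution := by
  intro d budget _
  show solution d budget = solution_alt d budget
  unfold solution solution_alt
  rw [solutionLoop_eq_pvF, solAltLoop_eq_pvF]
  simp
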